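-- pv_equiv track=rewrite | github.com/894132/lspd | email_scraper.py | prioritize_contact_links
-- ===== SOURCE A (Python) =====
-- def prioritize_contact_links(links):
--     """Ordina i link dando priorità a quelli che contengono 'contatti' o 'contact'."""
--     contact_keywords = ["contatti", "contact"]
--     prioritized = []
--     others = []
--
--     for link in links:
--         if any(keyword in link.lower() for keyword in contact_keywords):
--             prioritized.append(link)
--         else:
--             others.append(link)
--
--     return prioritized + others  # Link prioritari prima, poi gli altri
-- ===== SOURCE B (Python) =====
-- def prioritize_contact_links(links):
--     """Ordina i link dando priorità a quelli che contengono 'contatti' o 'contact'."""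
--     contact_keywords = ["contatti", "contact"]
--     return sorted(links, key=lambda link: 0 if any(kw in link.lower() for kw in contact_keywords) else 1)
-- ===== Notes on version B (the rewrite author's own statement) =====
-- stated objective: idiomatic
-- what changed: Replaced the two-accumulator partition loop with a single stable sort on a 0/1 key (contact-keyword links first), relying on sort stability to preserve in-group order.
import Mathlib
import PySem

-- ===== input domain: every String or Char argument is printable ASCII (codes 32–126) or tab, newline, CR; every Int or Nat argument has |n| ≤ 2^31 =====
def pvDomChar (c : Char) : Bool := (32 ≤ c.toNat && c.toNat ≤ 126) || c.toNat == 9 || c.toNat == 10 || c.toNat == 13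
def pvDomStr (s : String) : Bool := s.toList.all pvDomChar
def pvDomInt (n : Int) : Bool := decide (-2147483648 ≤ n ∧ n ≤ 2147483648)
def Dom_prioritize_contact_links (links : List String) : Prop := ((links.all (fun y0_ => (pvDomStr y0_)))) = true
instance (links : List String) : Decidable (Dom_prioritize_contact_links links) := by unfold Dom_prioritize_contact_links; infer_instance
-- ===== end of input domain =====

-- B replaces A's two-accumulator partition loop by one stable sort on a 0/1 key (idiomatic one-liner); same results.


-- ===== PORT A =====
-- 'any(keyword in link.lower() for keyword in contact_keywords)' (shared by both Pythons verbatim)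
def pvContactPred (link : String) : Bool :=
  (["contatti", "contact"] : List String).any (fun kw => PySem.Str.isIn kw (PySem.Str.lower link))

def prioritize_contact_links (links : List String) : List String :=
  let r := links.foldl
    (fun st link =>
      if pvContactPred link then (st.1 ++ [link], st.2) else (st.1, st.2 ++ [link]))
    ([], [])
  r.1 ++ r.2

-- ===== PORT B =====
-- Source B's sort key: 0 if the link contains a contact keyword else 1
def pvContactKey (link : String) : Int := if pvContactPred link then 0 else 1

def prioritize_contact_links_alt (links : List String) : List String :=
  PySem.List.sorted links pvContactKey false

-- ===== PRECONDITION & SPEC =====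
def Spec_prioritize_contact_links (links : List String) (out : List String) : Prop := out = prioritize_contact_links_alt links
instance (links : List String) (out : List String) : Decidable (Spec_prioritize_contact_links links out) := by unfold Spec_prioritize_contact_links; infer_instance

-- ===== CLAIM (what is proved, stated in full; the proofs are below) =====
def Claim_equal_prioritize_contact_links : Prop := ∀ (links : List String), Dom_prioritize_contact_links links → Spec_prioritize_contact_links links (prioritize_contact_links links)

-- ===== LEMMAS AND PROOFS =====

-- stable insertion of x into (prioritized ++ others): lands at the group boundary or at the end
theorem pv_insert_key (x : String) (A B : List String)
    (hA : ∀ a ∈ A, pvContactPred a = true) (hB : ∀ b ∈ B, pvContactPred b = false) :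
    PySem.List.insertBy (fun a b => decide (pvContactKey a < pvContactKey b)) x (A ++ B) =
      if pvContactPred x then A ++ x :: B else (A ++ B) ++ [x] := by
  induction A with
  | nil =>
    simp only [List.nil_append]
    induction B with
    | nil =>
      simp [PySem.List.insertBy]
    | cons b B' ihB =>
      have hb : pvContactPred b = false := hB b (by simp)
      by_cases hx : pvContactPred x = true
      · simp [PySem.List.insertBy, pvContactKey, hb, hx]
      · simp only [Bool.not_eq_true] at hx
        have := ihB (fun y hy => hB y (by simp [hy]))
        simp [PySem.List.insertBy, pvContactKey, hb, hx] at this ⊢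
        exact this
  | cons a A' ihA =>
    have ha : pvContactPred a = true := hA a (by simp)
    have hlt : decide (pvContactKey x < pvContactKey a) = false := by
      simp [pvContactKey, ha]
      by_cases hx : pvContactPred x = true <;> simp [hx]
    have := ihA (fun y hy => hA y (by simp [hy]))
    by_cases hx : pvContactPred x = true
    · simp [PySem.List.insertBy, hlt, hx] at this ⊢
      exact this
    · simp only [Bool.not_eq_true] at hx
      simp [PySem.List.insertBy, hlt, hx] at this ⊢
      exact this

-- loop invariant: A's pair-state concatenated equals B's insertion-sort accumulator
theorem pv_loop_eq (ls : List String) (P O : List String)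
    (hP : ∀ a ∈ P, pvContactPred a = true) (hO : ∀ b ∈ O, pvContactPred b = false) :
    (ls.foldl
      (fun st link =>
        if pvContactPred link then (st.1 ++ [link], st.2) else (st.1, st.2 ++ [link]))
      (P, O)).1 ++
    (ls.foldl
      (fun st link =>
        if pvContactPred link then (st.1 ++ [link], st.2) else (st.1, st.2 ++ [link]))
      (P, O)).2 =
    ls.foldl (fun acc x => PySem.List.insertBy (fun a b => decide (pvContactKey a < pvContactKey b)) x acc) (P ++ O) := by
  induction ls generalizing P O with
  | nil => simp
  | cons x rest ih =>
    simp only [List.foldl_cons]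
    rw [pv_insert_key x P O hP hO]
    by_cases hx : pvContactPred x = true
    · simp only [hx, if_true]
      have : P ++ x :: O = (P ++ [x]) ++ O := by simp
      rw [this]
      exact ih (P ++ [x]) O
        (fun a ha => by rcases List.mem_append.1 ha with h | h
                        · exact hP a h
                        · simp at h; simpa [h] using hx) hO
    · simp only [Bool.not_eq_true] at hx
      simp only [hx, Bool.false_eq_true, if_false]
      have : (P ++ O) ++ [x] = P ++ (O ++ [x]) := by simp
      rw [this]
      exact ih P (O ++ [x]) hP
        (fun b hb => by rcases List.mem_append.1 hb with h | h
                        · exact hO b h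
                        · simp at h; simpa [h] using hx)

-- ===== VERDICT (by name: the statement is the Claim_ definition above) =====
theorem prioritize_contact_links_spec : Claim_equal_prioritize_contact_links := by
  intro links _
  unfold Spec_prioritize_contact_links prioritize_contact_links prioritize_contact_links_alt
  rw [PySem.List.sorted_eq_foldl_insertBy]
  exact pv_loop_eq links [] [] (by simp) (by simp)
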